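-- pv_equiv track=rewrite | github.com/Liza-O/Matrices | main.py | minInColumns
-- ===== SOURCE A (Python) =====
-- def minInColumns(matrix):
--     num_cols = len(matrix[0])
--     min_values = []
--     for j in range(num_cols):
--         col_min = float('inf')
--         for i in range(len(matrix)):
--             if matrix[i][j]< col_min:
--                 col_min = matrix[i][j]
--         min_values.append(col_min)
--     return min_values
-- ===== SOURCE B (Python) =====
-- def minInColumns(matrix):
--     num_cols = len(matrix[0])
--
--     def helper(rows):
--         if len(rows) == 1:
--             return list(rows[0][:num_cols])
--         mid = len(rows) // 2
--         left = helper(rows[:mid])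
--         right = helper(rows[mid:])
--         return [l if l < r else r for l, r in zip(left, right)]
--
--     return helper(matrix)
-- ===== Notes on version B (the rewrite author's own statement) =====
-- stated objective: alternative
-- what changed: Divide-and-conquer: recursively split the row list in half, compute each half's per-column minima, and merge the two minima vectors elementwise, instead of A's column-major double loop with a float('inf') sentinel.
import Mathlib
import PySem

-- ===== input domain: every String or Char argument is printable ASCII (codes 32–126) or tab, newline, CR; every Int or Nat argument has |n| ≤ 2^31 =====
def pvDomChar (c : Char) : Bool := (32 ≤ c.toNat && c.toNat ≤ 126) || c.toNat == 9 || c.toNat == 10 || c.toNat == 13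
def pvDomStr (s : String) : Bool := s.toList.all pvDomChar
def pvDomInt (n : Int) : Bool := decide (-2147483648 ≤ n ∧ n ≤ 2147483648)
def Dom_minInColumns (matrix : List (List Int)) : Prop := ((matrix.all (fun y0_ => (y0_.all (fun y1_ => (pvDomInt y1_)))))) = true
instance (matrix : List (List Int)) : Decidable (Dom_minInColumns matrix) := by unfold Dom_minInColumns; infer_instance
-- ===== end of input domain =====

-- B replaces A's column-major rescan (with a float('inf') sentinel) by a
-- divide-and-conquer over the rows: per-column minima of each half, merged
-- elementwise (alternative decomposition, same asymptotic cost).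

-- ===== PORT A =====
-- col_min = float('inf') is ported as `none` (every int compares < inf, matching the
-- option step); matrix[i][j] is ported as getD j 0, exact under Pre_ (index in range).
def minInColumns (matrix : List (List Int)) : List Int :=
  let numCols := (matrix.headD []).length
  (List.range numCols).map (fun j =>
    (matrix.foldl (fun acc row =>
      match acc with
      | none => some (row.getD j 0)
      | some m => if row.getD j 0 < m then some (row.getD j 0) else some m) none).getD 0)

-- ===== PORT B =====
-- [l if l < r else r for l, r in zip(left, right)]
def pvMerge (l r : List Int) : List Int :=
  (l.zip r).map (fun p => if p.1 < p.2 then p.1 else p.2)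

-- helper(rows): split the rows in half, recurse, merge the two minima vectors.
-- Python's helper is only ever called on nonempty rows; the [] branch makes the
-- same computation total.
def pvHelper (numCols : Nat) (rows : List (List Int)) : List Int :=
  match rows with
  | [] => []
  | [r] => r.take numCols
  | a :: b :: rest =>
      pvMerge (pvHelper numCols ((a :: b :: rest).take ((a :: b :: rest).length / 2)))
              (pvHelper numCols ((a :: b :: rest).drop ((a :: b :: rest).length / 2)))
termination_by rows.length
decreasing_by
  · simp [List.length_take]; omega
  · simp [List.length_drop]; omega

-- num_cols = len(matrix[0]) raises IndexError on [] (excluded by Pre_).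
def minInColumns_alt (matrix : List (List Int)) : List Int :=
  pvHelper (matrix.headD []).length matrix

-- ===== PRECONDITION & SPEC =====
-- Pre_ excludes exactly the inputs where Python A raises IndexError: the empty matrix
-- (matrix[0]) and ragged matrices whose later rows are shorter than the first row.
def Pre_minInColumns (matrix : List (List Int)) : Prop :=
  matrix ≠ [] ∧ ∀ row ∈ matrix, (matrix.headD []).length ≤ row.length
instance (matrix : List (List Int)) : Decidable (Pre_minInColumns matrix) := by
  unfold Pre_minInColumns; infer_instance
def pvWitness_minInColumns : List (List Int) := [[1, 5], [3, 0]]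

def Spec_minInColumns (matrix : List (List Int)) (out : List Int) : Prop := out = minInColumns_alt matrix
instance (matrix : List (List Int)) (out : List Int) : Decidable (Spec_minInColumns matrix out) := by unfold Spec_minInColumns; infer_instance

-- ===== CLAIM (what is proved, stated in full; the proofs are below) =====
def Claim_equal_minInColumns : Prop := ∀ (matrix : List (List Int)), Dom_minInColumns matrix → Pre_minInColumns matrix → Spec_minInColumns matrix (minInColumns matrix)

-- ===== LEMMAS AND PROOFS =====

-- per-column minimum of a nonempty row list (proof-side characterisation)
def pvM (j : Nat) (rows : List (List Int)) : Int :=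
  match rows with
  | [] => 0
  | r :: rs => (rs.map (fun x => x.getD j 0)).foldl min (r.getD j 0)

theorem pvFoldlMin_pull (c : Int) (y : Int) (l : List Int) :
    l.foldl min (min c y) = min c (l.foldl min y) := by
  induction l generalizing y with
  | nil => rfl
  | cons z l ih => simp only [List.foldl_cons, min_assoc, ih]

theorem pvM_append (j : Nat) (xs ys : List (List Int)) (hx : xs ≠ []) (hy : ys ≠ []) :
    pvM j (xs ++ ys) = min (pvM j xs) (pvM j ys) := by
  match xs, ys with
  | x :: xs', y :: ys' =>
    simp only [pvM, List.cons_append, List.map_append, List.foldl_append, List.map_cons,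
      List.foldl_cons]
    rw [← pvFoldlMin_pull]

theorem pvMerge_map (f g : Nat → Int) (l : List Nat) :
    pvMerge (l.map f) (l.map g) = l.map (fun j => min (f j) (g j)) := by
  unfold pvMerge
  rw [List.zip_map', List.map_map]
  apply List.map_congr_left
  intro j _
  simp [min_def]
  omega

theorem pvHelper_eq (numCols : Nat) (rows : List (List Int)) (hne : rows ≠ [])
    (hlen : ∀ r ∈ rows, numCols ≤ r.length) :
    pvHelper numCols rows = (List.range numCols).map (fun j => pvM j rows) := by
  match rows with
  | [r] =>
    simp only [pvHelper]
    have hr : numCols ≤ r.length := hlen r (by simp)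
    apply List.ext_getElem
    · simp [hr]
    · intro j hj _
      simp only [List.getElem_take, List.getElem_map, List.getElem_range]
      have hjn : j < numCols := by simpa [hr] using hj
      simp [pvM, List.getD, List.getElem?_eq_getElem (lt_of_lt_of_le hjn hr)]
  | a :: b :: rest =>
    rw [pvHelper]
    have hlen2 : 2 ≤ (a :: b :: rest).length := by simp
    set rs := a :: b :: rest with hrs
    have hsplit : rs = rs.take (rs.length / 2) ++ rs.drop (rs.length / 2) :=
      (List.take_append_drop _ _).symm
    have hx : rs.take (rs.length / 2) ≠ [] := by
      intro h
      have := congrArg List.length h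
      simp [List.length_take] at this
      omega
    have hy : rs.drop (rs.length / 2) ≠ [] := by
      intro h
      have := congrArg List.length h
      simp [List.length_drop] at this
      omega
    rw [pvHelper_eq numCols _ hx (fun r hr => hlen r (List.mem_of_mem_take hr)),
        pvHelper_eq numCols _ hy (fun r hr => hlen r (List.mem_of_mem_drop hr)),
        pvMerge_map]
    apply List.map_congr_left
    intro j _
    show min (pvM j (rs.take (rs.length / 2))) (pvM j (rs.drop (rs.length / 2))) = pvM j rs
    conv_rhs => rw [hsplit]
    exact (pvM_append j _ _ hx hy).symm
termination_by rows.length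
decreasing_by
  · simp [List.length_take]; omega
  · simp [List.length_drop]; omega

-- A's inner fold, once the accumulator is `some z`, computes the plain min-fold.
theorem pvA_fold_some (j : Nat) (rows : List (List Int)) (z : Int) :
    rows.foldl (fun acc row =>
      match acc with
      | none => some (row.getD j 0)
      | some m => if row.getD j 0 < m then some (row.getD j 0) else some m) (some z)
    = some (rows.foldl (fun m row => if row.getD j 0 < m then row.getD j 0 else m) z) := by
  induction rows generalizing z with
  | nil => rfl
  | cons r rs ih =>
    simp only [List.foldl_cons]
    split_ifs <;> exact ih _

theorem pvA_col (j : Nat) (rows : List (List Int)) (z : Int) :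
    rows.foldl (fun m row => if row.getD j 0 < m then row.getD j 0 else m) z
    = (rows.map (fun x => x.getD j 0)).foldl min z := by
  induction rows generalizing z with
  | nil => rfl
  | cons r rs ih =>
    simp only [List.foldl_cons, List.map_cons]
    rw [show (if r.getD j 0 < z then r.getD j 0 else z) = min z (r.getD j 0) by
      rw [min_def]; split_ifs <;> omega]
    exact ih _

-- ===== VERDICT (by name: the statement is the Claim_ definition above) =====
theorem minInColumns_spec : Claim_equal_minInColumns := by
  intro matrix _ hpre
  unfold Spec_minInColumns
  obtain ⟨hne, hlen⟩ := hpre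
  match matrix, hne with
  | r0 :: rest, _ =>
    unfold minInColumns minInColumns_alt
    rw [pvHelper_eq _ _ (by simp) (by simpa using hlen)]
    simp only [List.headD_cons, List.foldl_cons]
    apply List.map_congr_left
    intro j _
    rw [pvA_fold_some, pvA_col]
    rfl
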